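-- pv_equiv track=rewrite | github.com/uxioandrade/hackXLR8 | app/srclib/interface_sum_yt_transcr.py | _summary_caps
-- ===== SOURCE A (Python) =====
-- def _summary_caps(summary_str):
--     summary = list(summary_str)
--     length = len(summary)
--     i = 0
--     while(i<length):
--         if summary[i] == '.':
--             while(i<length):
--                 i += 1
--                 if i == length:
--                     break
--                 if summary[i].isalpha():
--                     summary[i] = summary[i].upper()
--                     break
--         i+=1
--     return "".join(summary)
-- ===== SOURCE B (Python) =====
-- def _summary_caps(summary_str):
--     out = []
--     cap = False
--     for ch in summary_str:
--         if ch == '.':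
--             cap = True
--             out.append(ch)
--         elif cap and ch.isalpha():
--             out.append(ch.upper())
--             cap = False
--         else:
--             out.append(ch)
--     return "".join(out)
-- ===== Notes on version B (the rewrite author's own statement) =====
-- stated objective: simpler
-- what changed: Replaces A's nested while loops with index arithmetic and in-place list mutation by a single flat left-to-right scan carrying a capitalise-next boolean flag.
import Mathlib
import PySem

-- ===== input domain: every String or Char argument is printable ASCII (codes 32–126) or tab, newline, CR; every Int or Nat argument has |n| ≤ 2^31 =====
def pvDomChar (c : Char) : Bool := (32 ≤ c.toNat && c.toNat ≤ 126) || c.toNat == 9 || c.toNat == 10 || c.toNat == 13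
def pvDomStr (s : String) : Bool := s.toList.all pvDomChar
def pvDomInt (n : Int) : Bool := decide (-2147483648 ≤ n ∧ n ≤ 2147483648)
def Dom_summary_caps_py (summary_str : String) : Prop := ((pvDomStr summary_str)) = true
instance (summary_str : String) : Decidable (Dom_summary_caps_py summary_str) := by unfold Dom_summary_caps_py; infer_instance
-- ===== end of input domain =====

-- B is simpler: one flat scan with a boolean flag instead of A's nested while loops with index juggling.

-- ===== PORT A =====
-- inner while loop of A: 'while i<length: i+=1; if i==length: break;
-- if summary[i].isalpha(): summary[i] = summary[i].upper(); break'
-- (indices are always in range here, so list.getD is exact; on the ASCII domain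
-- Python's isalpha/upper are exactly Char.isAlpha/Char.toUpper)
def innerA (s : List Char) (i len : Nat) : List Char × Nat :=
  if _h : i < len then
    if i + 1 = len then (s, i + 1)
    else if (s.getD (i + 1) ' ').isAlpha then (s.set (i + 1) (s.getD (i + 1) ' ').toUpper, i + 1)
    else innerA s (i + 1) len
  else (s, i)
termination_by len - i

-- outer while loop of A; fuel = length + 1 never runs out since i grows each iteration
def outerA (fuel : Nat) (s : List Char) (i len : Nat) : List Char :=
  match fuel with
  | 0 => s
  | fuel + 1 =>
    if i < len then
      if s.getD i ' ' = '.' then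
        let p := innerA s i len
        outerA fuel p.1 (p.2 + 1) len
      else outerA fuel s (i + 1) len
    else s

def summary_caps_py (summary_str : String) : String :=
  let summary := summary_str.toList
  String.ofList (outerA (summary.length + 1) summary 0 summary.length)

-- ===== PORT B =====
-- single pass with a capitalise-next boolean flag (on the ASCII domain
-- Python's isalpha/upper are exactly Char.isAlpha/Char.toUpper)
def scanB (cap : Bool) : List Char → List Char
  | [] => []
  | c :: cs =>
    if c = '.' then c :: scanB true cs
    else if cap ∧ c.isAlpha then c.toUpper :: scanB false cs
    else c :: scanB cap cs

def summary_caps_py_alt (summary_str : String) : String :=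
  String.ofList (scanB false summary_str.toList)

-- ===== PRECONDITION & SPEC =====
def Spec_summary_caps_py (summary_str : String) (out : String) : Prop := out = summary_caps_py_alt summary_str
instance (summary_str : String) (out : String) : Decidable (Spec_summary_caps_py summary_str out) := by unfold Spec_summary_caps_py; infer_instance

-- ===== CLAIM (what is proved, stated in full; the proofs are below) =====
def Claim_equal_summary_caps_py : Prop := ∀ (summary_str : String), Dom_summary_caps_py summary_str → Spec_summary_caps_py summary_str (summary_caps_py summary_str)

-- ===== LEMMAS AND PROOFS =====

-- index (within the tail after the '.') at which A's inner loop stops: first alpha, or end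
def idxStop : List Char → Nat
  | [] => 0
  | c :: t => if c.isAlpha then 0 else 1 + idxStop t

-- the part of the tail A's inner loop walks over, with the found alpha uppercased
def capPre : List Char → List Char
  | [] => []
  | c :: t => if c.isAlpha then [c.toUpper] else c :: capPre t

lemma idxStop_le (t : List Char) : idxStop t ≤ t.length := by
  induction t with
  | nil => simp [idxStop]
  | cons c t ih => simp only [idxStop, List.length_cons]; split <;> omega

lemma capPre_length (t : List Char) (h : idxStop t < t.length) :
    (capPre t).length = idxStop t + 1 := by
  induction t with
  | nil => simp [idxStop] at h
  | cons c t ih =>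
    by_cases ha : c.isAlpha
    · simp [capPre, idxStop, ha]
    · simp [capPre, idxStop, ha] at h ⊢
      have := ih (by omega)
      omega

lemma capPre_eq_self (t : List Char) (h : ¬ idxStop t < t.length) : capPre t = t := by
  induction t with
  | nil => simp [capPre]
  | cons c t ih =>
    by_cases ha : c.isAlpha
    · simp [idxStop, ha] at h
    · simp [capPre, ha]
      apply ih
      simp [idxStop, ha] at h
      omega

-- inner loop characterisation: called at index i with summary = q ++ rest, i + 1 = q.length
lemma innerA_eq (rest : List Char) : ∀ (q : List Char) (i : Nat), i + 1 = q.length →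
    innerA (q ++ rest) i (q.length + rest.length) =
      (q ++ capPre rest ++ rest.drop (idxStop rest + 1), q.length + idxStop rest) := by
  induction rest with
  | nil =>
    intro q i hq
    have hi : i < q.length + ([] : List Char).length := by simp; omega
    rw [innerA, dif_pos hi, if_pos (by simpa using hq)]
    simp [capPre, idxStop, hq]
  | cons c t ih =>
    intro q i hq
    have hi : i < q.length + (c :: t).length := by simp; omega
    have hne : ¬ (i + 1 = q.length + (c :: t).length) := by simp; omega
    have hgd : (q ++ c :: t).getD (i + 1) ' ' = c := by rw [hq]; simp [List.getD]
    rw [innerA, dif_pos hi, if_neg hne, hgd]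
    by_cases ha : c.isAlpha
    · rw [if_pos ha]
      simp [capPre, idxStop, ha, hq]
    · rw [if_neg ha, hq]
      have hs : q ++ c :: t = (q ++ [c]) ++ t := by simp
      have hl : q.length + (c :: t).length = (q ++ [c]).length + t.length := by simp; omega
      rw [hs, hl, ih (q ++ [c]) q.length (by simp)]
      have h2 : 1 + idxStop t + 1 = idxStop t + 1 + 1 := by omega
      simp [capPre, idxStop, ha, h2]
      omega

-- B's true-flag scan splits at the stopping point of A's inner loop
lemma scanB_true_split (rest : List Char) :
    scanB true rest = capPre rest ++ scanB false (rest.drop (idxStop rest + 1)) := by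
  induction rest with
  | nil => simp [scanB, capPre, idxStop]
  | cons c t ih =>
    by_cases ha : c.isAlpha
    · have hc : c ≠ '.' := by rintro rfl; simp [Char.isAlpha] at ha
      simp [scanB, capPre, idxStop, ha, hc]
    · have h2 : 1 + idxStop t + 1 = (idxStop t + 1) + 1 := by omega
      by_cases hc : c = '.'
      · subst hc
        simp [scanB, capPre, idxStop, ha, ih, h2]
      · simp [scanB, capPre, idxStop, ha, hc, ih, h2]

lemma outerA_stop (fuel : Nat) (s : List Char) (i len : Nat)
    (hf : 0 < fuel) (h : ¬ i < len) : outerA fuel s i len = s := by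
  cases fuel with
  | zero => omega
  | succ f => rw [outerA]; simp [h]

-- main loop correspondence
lemma outerA_eq (fuel : Nat) : ∀ (rest pre : List Char), rest.length + 1 ≤ fuel →
    outerA fuel (pre ++ rest) pre.length (pre.length + rest.length) =
      pre ++ scanB false rest := by
  induction fuel with
  | zero => intro rest pre h; omega
  | succ fuel ih =>
    intro rest pre hf
    cases rest with
    | nil =>
      rw [outerA]
      simp [scanB]
    | cons c t =>
      have hi : pre.length < pre.length + (c :: t).length := by simp
      have hgd : (pre ++ c :: t).getD pre.length ' ' = c := by simp [List.getD]
      rw [outerA, if_pos hi, hgd]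
      by_cases hc : c = '.'
      · subst hc
        rw [if_pos rfl]
        have hs : pre ++ '.' :: t = (pre ++ ['.']) ++ t := by simp
        have hl : pre.length + ('.' :: t).length = (pre ++ ['.']).length + t.length := by
          simp; omega
        rw [hs, hl, innerA_eq t (pre ++ ['.']) pre.length (by simp)]
        by_cases hstop : idxStop t < t.length
        · -- the inner loop found an alpha; the outer loop resumes right after it
          have hcp := capPre_length t hstop
          have key := ih (t.drop (idxStop t + 1)) ((pre ++ ['.']) ++ capPre t)
            (by simp at hf ⊢; omega)
          have e2 : (pre ++ ['.']).length + idxStop t + 1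
              = ((pre ++ ['.']) ++ capPre t).length := by simp [hcp]; omega
          have e3 : (pre ++ ['.']).length + t.length
              = ((pre ++ ['.']) ++ capPre t).length + (t.drop (idxStop t + 1)).length := by
            simp [hcp]; omega
          simp only []
          rw [e2, e3, key]
          simp [scanB, scanB_true_split t]
        · -- no alpha after the '.'; the inner loop ran to the end and the outer loop exits
          have hidx : idxStop t = t.length := le_antisymm (idxStop_le t) (by omega)
          have hdrop : t.drop (idxStop t + 1) = [] := by
            apply List.drop_eq_nil_of_le; omega
          rw [capPre_eq_self t hstop, hdrop]
          rw [outerA_stop fuel _ _ _ (by omega) (by simp [hidx])]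
          simp [scanB, scanB_true_split t, capPre_eq_self t hstop, hdrop]
      · rw [if_neg hc]
        have hs : pre ++ c :: t = (pre ++ [c]) ++ t := by simp
        have hl : pre.length + (c :: t).length = (pre ++ [c]).length + t.length := by
          simp; omega
        have hpl : pre.length + 1 = (pre ++ [c]).length := by simp
        rw [hs, hl, hpl, ih t (pre ++ [c]) (by simp at hf ⊢; omega)]
        simp [scanB, hc]

-- ===== VERDICT (by name: the statement is the Claim_ definition above) =====
theorem summary_caps_py_spec : Claim_equal_summary_caps_py := by
  intro s _
  unfold Spec_summary_caps_py summary_caps_py summary_caps_py_alt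
  have := outerA_eq (s.toList.length + 1) s.toList [] (by simp)
  simpa using congrArg String.ofList this
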